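-- pv_equiv track=rewrite | github.com/qarlosh/heroed | heroed/ui/terrain.py | data_to_screen_str
-- ===== SOURCE A (Python) =====
-- def data_to_screen_width(x):
--     """
--     Returns the width at screen of a data position.
--     It can be 1 column or 2 columns.
--     x       data position, from 0 to 31
--     returns screen columns occupied by given data position: 1 or 2.
--     """
--     return x % 2 + 1
--
-- def data_to_screen_str(data, reversed_rightside):
--     """
--     converts data to a string of 0 and 1, ready to print to screen.
--     data                bytearray with 4 bytes (data).
--     reversed_rightside  if reverse_rightside was set in the data. In this case,
--                         right side is offsetted in some specific way.
--     returns string of 64 chars length.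
--     """
--     if reversed_rightside:
--         datastr_left = "".join("{:08b}".format(b) for b in data[0:2])
--         datastr_right = "".join("{:08b}".format(b) for b in data[2:4])
--         s = "11111111%s" % "".join(
--             c * data_to_screen_width(pos) for pos, c in enumerate(datastr_left)
--         )
--         s += "111111%s" % "".join(
--             c * data_to_screen_width(pos)
--             for pos, c in enumerate(datastr_right)
--         )
--         s += s[-2:]
--         return s
--     else:
--         datastr = "".join("{:08b}".format(b) for b in data)
--         return "11111111%s11111111" % "".join(
--             c * data_to_screen_width(pos) for pos, c in enumerate(datastr)
--         )
-- ===== SOURCE B (Python) =====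
-- # Same conversion, but chunking: expand the bit string two characters at a
-- # time ("ab" -> "abb") instead of a per-character position-width lookup.
-- def _expand(byts):
--     t = "".join(format(b, "08b") for b in byts)
--     return "".join(t[i:i+2] + t[i+1:i+2] for i in range(0, len(t), 2))
--
-- def data_to_screen_str(data, reversed_rightside):
--     if reversed_rightside:
--         s = "11111111" + _expand(data[0:2]) + "111111" + _expand(data[2:4])
--         return s + s[-2:]
--     return "11111111" + _expand(data) + "11111111"
-- ===== Notes on version B (the rewrite author's own statement) =====
-- stated objective: alternative
-- what changed: Replaces the per-character enumerate pass with a position-parity width lookup by a chunking pass that consumes the bit string two characters at a time ("ab" -> "abb"), with no position counter or width helper.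
import Mathlib
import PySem

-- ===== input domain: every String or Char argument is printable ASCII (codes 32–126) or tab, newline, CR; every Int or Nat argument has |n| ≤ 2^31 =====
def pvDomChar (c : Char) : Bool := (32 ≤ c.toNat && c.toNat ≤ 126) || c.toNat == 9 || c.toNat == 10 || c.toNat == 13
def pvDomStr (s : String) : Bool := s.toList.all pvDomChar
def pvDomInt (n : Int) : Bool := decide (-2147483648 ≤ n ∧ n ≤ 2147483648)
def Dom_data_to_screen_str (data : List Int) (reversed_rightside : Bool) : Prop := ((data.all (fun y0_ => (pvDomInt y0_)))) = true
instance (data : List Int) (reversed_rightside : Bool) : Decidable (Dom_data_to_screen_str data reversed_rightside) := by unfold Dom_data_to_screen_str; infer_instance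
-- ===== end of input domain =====

-- ===== PORT A =====
-- B changes the expansion pass: A expands per character with a position-width lookup; B chunks the bit string two characters at a time. Equivalence of return values is proved; no speed claim.

-- shared helper: format(b, "08b") (both Pythons call this library formatter)
def fmt08b (b : Int) : List Char :=
  let t := PySem.Int.toBinChars b
  if b < 0 then '-' :: (List.replicate (8 - t.length) '0' ++ t.tail)
  else List.replicate (8 - t.length) '0' ++ t

def data_to_screen_width (x : Int) : Int := PySem.Int.mod x 2 + 1

-- "".join(c * data_to_screen_width(pos) for pos, c in enumerate(t))
def expandA (t : List Char) : List Char :=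
  ((PySem.List.enumerate t 0).map
    (fun pc => PySem.List.pyRepeat [pc.2] (data_to_screen_width pc.1))).flatten

def data_to_screen_str (data : List Int) (reversed_rightside : Bool) : String :=
  if reversed_rightside then
    let datastr_left := ((PySem.List.slice data (some 0) (some 2)).map fmt08b).flatten
    let datastr_right := ((PySem.List.slice data (some 2) (some 4)).map fmt08b).flatten
    let s := ['1','1','1','1','1','1','1','1'] ++ expandA datastr_left
    let s := s ++ (['1','1','1','1','1','1'] ++ expandA datastr_right)
    let s := s ++ PySem.List.slice s (some (-2)) none
    String.ofList s
  else
    let datastr := (data.map fmt08b).flatten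
    String.ofList (['1','1','1','1','1','1','1','1'] ++ expandA datastr ++ ['1','1','1','1','1','1','1','1'])

-- ===== PORT B =====
-- "".join(t[i:i+2] + t[i+1:i+2] for i in range(0, len(t), 2))
def expandB (t : List Char) : List Char :=
  ((PySem.List.pyRange 0 (t.length) 2).map
    (fun i => PySem.List.slice t (some i) (some (i + 2)) ++
      PySem.List.slice t (some (i + 1)) (some (i + 2)))).flatten

def data_to_screen_str_alt (data : List Int) (reversed_rightside : Bool) : String :=
  if reversed_rightside then
    let s := ['1','1','1','1','1','1','1','1']
      ++ expandB (((PySem.List.slice data (some 0) (some 2)).map fmt08b).flatten)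
      ++ ['1','1','1','1','1','1']
      ++ expandB (((PySem.List.slice data (some 2) (some 4)).map fmt08b).flatten)
    String.ofList (s ++ PySem.List.slice s (some (-2)) none)
  else
    String.ofList (['1','1','1','1','1','1','1','1']
      ++ expandB ((data.map fmt08b).flatten) ++ ['1','1','1','1','1','1','1','1'])

-- ===== PRECONDITION & SPEC =====
def Spec_data_to_screen_str (data : List Int) (reversed_rightside : Bool) (out : String) : Prop := out = data_to_screen_str_alt data reversed_rightside
instance (data : List Int) (reversed_rightside : Bool) (out : String) : Decidable (Spec_data_to_screen_str data reversed_rightside out) := by unfold Spec_data_to_screen_str; infer_instance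

-- ===== CLAIM (what is proved, stated in full; the proofs are below) =====
def Claim_equal_data_to_screen_str : Prop := ∀ (data : List Int) (reversed_rightside : Bool), Dom_data_to_screen_str data reversed_rightside → Spec_data_to_screen_str data reversed_rightside (data_to_screen_str data reversed_rightside)

-- ===== LEMMAS AND PROOFS =====

-- proof-side recursive description of B's chunking pass
def chunkRec : List Char → List Char
  | [] => []
  | a :: rest => a :: rest.take 1 ++ rest.take 1 ++ chunkRec (rest.drop 1)
  termination_by t => t.length
  decreasing_by simp

theorem pyRange_two_cons (j len : Nat) (hj : j < len) :
    PySem.List.pyRange (j : Int) (len : Int) 2 =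
      (j : Int) :: PySem.List.pyRange ((j : Int) + 2) (len : Int) 2 := by
  rw [PySem.List.pyRange_of_pos _ _ (by norm_num), PySem.List.pyRange_of_pos _ _ (by norm_num)]
  have hc : (if (j : Int) < (len : Int) then ((((len : Int)) - j + 2 - 1) / 2).toNat else 0)
      = (if (j : Int) + 2 < (len : Int) then (((len : Int) - ((j : Int) + 2) + 2 - 1) / 2).toNat else 0) + 1 := by
    split_ifs <;> omega
  rw [hc, List.range_succ_eq_map, List.map_cons, List.map_map]
  refine congrArg₂ _ (by ring) (List.map_congr_left ?_)
  intro k _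
  simp only [Function.comp]
  push_cast
  ring

theorem chunk_ok (t : List Char) : ∀ (u : List Char) (j : Nat), u = t.drop j →
    ((PySem.List.pyRange (j : Int) (t.length : Int) 2).map
      (fun i => PySem.List.slice t (some i) (some (i + 2)) ++
        PySem.List.slice t (some (i + 1)) (some (i + 2)))).flatten = chunkRec u := by
  intro u
  induction u using chunkRec.induct with
  | case1 =>
    intro j hj
    have hlen : t.length ≤ j := by
      have := congrArg List.length hj; simp at this; omega
    rw [PySem.List.pyRange_of_pos _ _ (by norm_num)]
    rw [if_neg (by omega)]
    simp [chunkRec]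
  | case2 a rest ih =>
    intro j hj
    have hjlt : j < t.length := by
      by_contra h
      rw [List.drop_eq_nil_of_le (by omega)] at hj
      simp at hj
    have hdrop2 : rest.drop 1 = t.drop (j + 2) := by
      have : (t.drop j).drop 2 = rest.drop 1 := by rw [← hj]; simp
      rw [← this, List.drop_drop]
    rw [pyRange_two_cons j t.length hjlt, List.map_cons]
    have hs1 : PySem.List.slice t (some (j : Int)) (some ((j : Int) + 2)) = a :: rest.take 1 := by
      have := PySem.List.slice_natCast_add t j 2
      push_cast at this
      rw [this, ← hj]
      simp
    have hs2 : PySem.List.slice t (some ((j : Int) + 1)) (some ((j : Int) + 2)) = rest.take 1 := by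
      have h := PySem.List.slice_natCast_add t (j + 1) 1
      push_cast at h
      rw [show ((j : Int) + 2) = ((j : Int) + 1 + 1) by ring, h]
      have hr : t.drop (j + 1) = rest := by
        have h' : (t.drop j).drop 1 = rest := by rw [← hj]; simp
        rw [← h', List.drop_drop]
      rw [hr]
    have ihr := ih (j + 2) hdrop2
    push_cast at ihr
    simp only [List.flatten_cons, hs1, hs2, ihr, chunkRec]

theorem expand_key (t : List Char) (k : Int) (hk : 0 ≤ k) (he : k % 2 = 0) :
    ((PySem.List.enumerate t k).map
      (fun pc => PySem.List.pyRepeat [pc.2] (data_to_screen_width pc.1))).flatten = chunkRec t := by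
  induction t using chunkRec.induct generalizing k with
  | case1 => simp [chunkRec, PySem.List.enumerate_nil]
  | case2 a rest ih =>
    cases rest with
    | nil =>
      simp [chunkRec, PySem.List.enumerate_cons, PySem.List.enumerate_nil,
        data_to_screen_width, he]
    | cons b r =>
      have h1 : (k + 1) % 2 = 1 := by omega
      have ihr := ih (k + 2) (by omega) (by omega)
      simp [chunkRec, PySem.List.enumerate_cons, data_to_screen_width] at ihr ⊢
      rw [show k + 1 + 1 = k + 2 by ring, he, h1, ihr]
      simp [List.replicate]

theorem expandA_eq (t : List Char) : expandA t = expandB t := by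
  have h1 := expand_key t 0 (by omega) (by decide)
  have h2 := chunk_ok t t 0 (by simp)
  simp only [expandA, expandB]
  rw [h1]
  simpa using h2.symm

-- ===== VERDICT (by name: the statement is the Claim_ definition above) =====
theorem data_to_screen_str_spec : Claim_equal_data_to_screen_str := by
  intro data r _
  unfold Spec_data_to_screen_str data_to_screen_str data_to_screen_str_alt
  cases r <;> simp [expandA_eq, List.append_assoc]
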